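-- pv_equiv track=rewrite | github.com/TheArchons/Competitive-Programming | CCC/Senior/2022/S3.py | goodSampleCount
-- ===== SOURCE A (Python) =====
-- def goodSampleCount(notes, requiredCount):
--     count = 0
--     for t in range(len(notes)):
--         if t >= len(notes) - 1 or notes[t] == notes[t+1]:
--             count += 1
--         else:
--             count += 2
--     if count == requiredCount:
--         return True
--     else:
--         return False
-- ===== SOURCE B (Python) =====
-- def goodSampleCount(notes, requiredCount):
--     # Stage 1: run-length encode the note sequence.
--     runs = []
--     for x in notes:
--         if runs and runs[-1][0] == x:
--             runs[-1] = (x, runs[-1][1] + 1)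
--         else:
--             runs.append((x, 1))
--     # Stage 2: each run of length L accounts for L+1 samples, except the final
--     # run, whose trailing boundary does not exist.
--     count = sum(L + 1 for _, L in runs)
--     if runs:
--         count -= 1
--     return count == requiredCount
-- ===== Notes on version B (the rewrite author's own statement) =====
-- stated objective: alternative
-- what changed: B first builds an explicit run-length encoding of the note list and then derives the sample count from the runs (sum of runLength+1 over all runs, minus one for the final run), instead of A's single index loop that adds 1 or 2 per position.
import Mathlib
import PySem

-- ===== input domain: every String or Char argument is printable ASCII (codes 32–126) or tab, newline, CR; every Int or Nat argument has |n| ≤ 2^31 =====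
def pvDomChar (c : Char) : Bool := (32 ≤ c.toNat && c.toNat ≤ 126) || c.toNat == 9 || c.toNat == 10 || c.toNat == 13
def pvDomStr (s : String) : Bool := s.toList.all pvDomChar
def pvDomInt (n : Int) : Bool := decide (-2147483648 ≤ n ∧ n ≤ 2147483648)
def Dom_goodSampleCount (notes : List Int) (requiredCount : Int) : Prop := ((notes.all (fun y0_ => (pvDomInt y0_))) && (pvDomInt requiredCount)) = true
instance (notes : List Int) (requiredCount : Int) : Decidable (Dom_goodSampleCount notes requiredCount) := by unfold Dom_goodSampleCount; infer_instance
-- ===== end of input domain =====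

-- B derives the count from an explicit run-length encoding of the notes instead of A's 1-or-2 per index loop (alternative).

-- ===== PORT A =====
-- notes[t+1] is ported as pyGetD: A's short-circuit 'or' guarantees t+1 is in range whenever it is read.
def goodSampleCount (notes : List Int) (requiredCount : Int) : Bool :=
  let count : Int :=
    (PySem.List.pyRange 0 (notes.length : Int) 1).foldl
      (fun count t =>
        if t ≥ (notes.length : Int) - 1 ∨
            PySem.List.pyGetD notes t 0 = PySem.List.pyGetD notes (t + 1) 0
        then count + 1 else count + 2) 0
  if count = requiredCount then true else false

-- ===== PORT B =====
-- one loop-body step of B's RLE construction: extend the last run or start a new one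
def pvRleStep (runs : List (Int × Int)) (x : Int) : List (Int × Int) :=
  match runs.getLast? with
  | some (v, L) => if v = x then runs.dropLast ++ [(x, L + 1)] else runs ++ [(x, 1)]
  | none => runs ++ [(x, 1)]

def goodSampleCount_alt (notes : List Int) (requiredCount : Int) : Bool :=
  let runs : List (Int × Int) := notes.foldl pvRleStep []
  let s : Int := (runs.map (fun p => p.2 + 1)).sum
  let count : Int := if runs = [] then s else s - 1
  decide (count = requiredCount)

-- ===== PRECONDITION & SPEC =====
def Spec_goodSampleCount (notes : List Int) (requiredCount : Int) (out : Bool) : Prop := out = goodSampleCount_alt notes requiredCount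
instance (notes : List Int) (requiredCount : Int) (out : Bool) : Decidable (Spec_goodSampleCount notes requiredCount out) := by unfold Spec_goodSampleCount; infer_instance

-- ===== CLAIM (what is proved, stated in full; the proofs are below) =====
def Claim_equal_goodSampleCount : Prop := ∀ (notes : List Int) (requiredCount : Int), Dom_goodSampleCount notes requiredCount → Spec_goodSampleCount notes requiredCount (goodSampleCount notes requiredCount)

-- ===== LEMMAS AND PROOFS =====

/-- Number of adjacent differing pairs, recursively. -/
def pvPd : List Int → Int
  | a :: b :: r => (if a ≠ b then 1 else 0) + pvPd (b :: r)
  | _ => 0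

/-- Weight of a run list: sum of (runLength + 1). -/
def pvS (rs : List (Int × Int)) : Int := (rs.map (fun p => p.2 + 1)).sum

lemma pvLoopA (full : List Int) : ∀ (suf pre : List Int), full = pre ++ suf → ∀ c : Int,
    (PySem.List.pyRange (pre.length : Int) ((pre.length : Int) + (suf.length : Int)) 1).foldl
      (fun count t =>
        if t ≥ (full.length : Int) - 1 ∨
            PySem.List.pyGetD full t 0 = PySem.List.pyGetD full (t + 1) 0
        then count + 1 else count + 2) c
      = c + suf.length + pvPd suf := by
  intro suf
  induction suf with
  | nil =>
      intro pre h c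
      simp [PySem.List.pyRange_one_eq_nil, pvPd]
  | cons a rest ih =>
      intro pre h c
      rw [PySem.List.pyRange_one_cons (by simp only [List.length_cons]; push_cast; omega)]
      rw [List.foldl_cons]
      cases rest with
      | nil =>
          have hcond : ((pre.length : Int) ≥ (full.length : Int) - 1 ∨
              PySem.List.pyGetD full (pre.length : Int) 0
                = PySem.List.pyGetD full ((pre.length : Int) + 1) 0) := by
            left
            subst h
            simp only [List.length_append, List.length_cons, List.length_nil]
            push_cast
            omega
          rw [if_pos hcond]
          rw [PySem.List.pyRange_one_eq_nil (by simp only [List.length_cons, List.length_nil]; push_cast; omega)]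
          simp [pvPd]
      | cons b r' =>
          have hga : PySem.List.pyGetD full (pre.length : Int) 0 = a := by
            subst h
            rw [PySem.List.pyGetD_natCast]
            simp [List.getD]
          have hgb : PySem.List.pyGetD full ((pre.length : Int) + 1) 0 = b := by
            subst h
            rw [show ((pre.length : Int) + 1) = (((pre.length + 1 : Nat)) : Int) by push_cast; ring]
            rw [PySem.List.pyGetD_natCast]
            simp [List.getD]
          have hlen : (full.length : Int) = (pre.length : Int) + (r'.length : Int) + 2 := by
            subst h; simp only [List.length_append, List.length_cons]; push_cast; ring
          have hnot : ¬ ((pre.length : Int) ≥ (full.length : Int) - 1) := by omega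
          have hstep := ih (pre ++ [a]) (by simp [h]) (c + (if a = b then 1 else 2))
          simp only [List.length_append, List.length_cons, List.length_nil] at hstep
          have heq : (if (pre.length : Int) ≥ (full.length : Int) - 1 ∨
              PySem.List.pyGetD full (pre.length : Int) 0
                = PySem.List.pyGetD full ((pre.length : Int) + 1) 0
            then c + 1 else c + 2) = c + (if a = b then 1 else 2) := by
            rw [hga, hgb]
            by_cases hab : a = b
            · rw [if_pos (Or.inr hab), if_pos hab]
            · rw [if_neg (by tauto), if_neg hab]
          rw [heq]
          simp only [List.length_cons] at hstep ⊢
          push_cast at hstep ⊢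
          ring_nf at hstep ⊢
          rw [hstep]
          simp only [pvPd]
          split_ifs <;> first | (exfalso; tauto) | ring

lemma pvRleStep_ne_nil (runs : List (Int × Int)) (x : Int) : pvRleStep runs x ≠ [] := by
  unfold pvRleStep
  rcases runs.getLast? with _ | ⟨v, L⟩
  · simp
  · dsimp only
    split_ifs <;> simp

lemma pvFold_ne_nil : ∀ (suf : List Int) (acc : List (Int × Int)), acc ≠ [] →
    suf.foldl pvRleStep acc ≠ [] := by
  intro suf
  induction suf with
  | nil => intro acc h; simpa using h
  | cons x r ih => intro acc _; exact ih _ (pvRleStep_ne_nil acc x)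

lemma pvBfold : ∀ (suf : List Int) (pre : List (Int × Int)) (a L : Int),
    pvS (suf.foldl pvRleStep (pre ++ [(a, L)]))
      = pvS (pre ++ [(a, L)]) + suf.length + pvPd (a :: suf) := by
  intro suf
  induction suf with
  | nil => intro pre a L; simp [pvPd]
  | cons x r ih =>
      intro pre a L
      rw [List.foldl_cons]
      have hstep : pvRleStep (pre ++ [(a, L)]) x =
          if a = x then pre ++ [(x, L + 1)] else (pre ++ [(a, L)]) ++ [(x, 1)] := by
        simp only [pvRleStep, List.getLast?_concat, List.dropLast_concat]
      rw [hstep]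
      by_cases h : a = x
      · rw [if_pos h, ih pre x (L + 1)]
        subst h
        simp only [pvPd, pvS, List.map_append, List.sum_append, List.length_cons]
        push_cast
        simp
        ring
      · rw [if_neg h, ih (pre ++ [(a, L)]) x 1]
        simp only [pvPd, pvS, List.map_append, List.sum_append, List.length_cons]
        rw [if_pos h]
        push_cast
        simp
        ring

-- ===== VERDICT (by name: the statement is the Claim_ definition above) =====
theorem goodSampleCount_spec : Claim_equal_goodSampleCount := by
  intro notes rc _
  unfold Spec_goodSampleCount goodSampleCount goodSampleCount_alt
  have hA := pvLoopA notes notes [] (by simp) 0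
  simp only [List.length_nil, Nat.cast_zero, zero_add] at hA
  rw [hA]
  cases notes with
  | nil => simp [pvPd]
  | cons a r =>
      have h1 : (a :: r).foldl pvRleStep [] = r.foldl pvRleStep ([] ++ [(a, 1)]) := by
        simp [pvRleStep]
      have hne : r.foldl pvRleStep ([] ++ [(a, 1)]) ≠ [] :=
        pvFold_ne_nil r _ (by simp)
      have hS := pvBfold r ([] : List (Int × Int)) a 1
      show (if (((a :: r).length : Int) + pvPd (a :: r)) = rc then true else false)
          = decide ((if ((a :: r).foldl pvRleStep []) = [] then
                pvS ((a :: r).foldl pvRleStep [])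
              else pvS ((a :: r).foldl pvRleStep []) - 1) = rc)
      rw [h1, if_neg hne, hS]
      simp only [pvS, List.nil_append, List.map_cons, List.map_nil, List.sum_cons,
        List.sum_nil, List.length_cons]
      push_cast
      split_ifs with hc
      · symm; rw [decide_eq_true_iff]; omega
      · symm; rw [decide_eq_false_iff_not]; omega
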